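-- pv_equiv track=rewrite | github.com/KNU-HAEDAL/2023_Sudal_Algorithm | 김강민/12월/1205/옹알이1.py | solution
-- ===== SOURCE A (Python) =====
-- def solution(babbling):
--     cnt = 0
--
--     for babble in babbling:
--         while babble:
--             if babble[:3] in ['aya', 'woo']:
--                 babble = babble[3:]
--             elif babble[:2] in ['ye', 'ma']:
--                 babble = babble[2:]
--             else:
--                 break
--         if babble == '':
--             cnt += 1
--
--     return cnt
-- ===== SOURCE B (Python) =====
-- def solution(babbling):
--     words = ('aya', 'ye', 'woo', 'ma')
--     total = 0
--     for s in babbling: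
--         dp = [True]
--         for i in range(1, len(s) + 1):
--             dp.append(any(len(w) <= i and s[i - len(w):i] == w and dp[i - len(w)]
--                           for w in words))
--         total += dp[-1]
--     return total
-- ===== Notes on version B (the rewrite author's own statement) =====
-- stated objective: alternative
-- what changed: Replaces A's greedy prefix-stripping while-loop per babble with a word-break dynamic-programming row dp[i] = 'prefix of length i is a concatenation of tokens', summing dp[len(s)] over the babbles.
import Mathlib
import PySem

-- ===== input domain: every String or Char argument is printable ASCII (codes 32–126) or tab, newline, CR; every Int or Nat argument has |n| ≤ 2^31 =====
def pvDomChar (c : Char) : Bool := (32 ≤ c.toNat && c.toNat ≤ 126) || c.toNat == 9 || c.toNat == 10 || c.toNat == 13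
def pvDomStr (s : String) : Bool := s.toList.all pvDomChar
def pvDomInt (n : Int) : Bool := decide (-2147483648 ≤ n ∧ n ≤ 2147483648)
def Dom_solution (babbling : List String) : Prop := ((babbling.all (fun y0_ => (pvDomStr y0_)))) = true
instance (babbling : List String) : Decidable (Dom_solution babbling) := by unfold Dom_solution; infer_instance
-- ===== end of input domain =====

-- B replaces A's greedy front-stripping while-loop with a word-break DP row per babble (objective: alternative algorithm, similar cost).

-- ===== PORT A =====
-- A's while-loop: repeatedly strip a matching prefix; returns the residual string.
-- babble[:3] / babble[3:] are nonnegative slices → List.take / List.drop (exact there).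
def stripA (s : List Char) : List Char :=
  if s = [] then s          -- 'while babble:' — loop exits when the string is empty
  else if s.take 3 = ['a','y','a'] ∨ s.take 3 = ['w','o','o'] then stripA (s.drop 3)
  else if s.take 2 = ['y','e'] ∨ s.take 2 = ['m','a'] then stripA (s.drop 2)
  else s                    -- 'break'
termination_by s.length
decreasing_by
  · rename_i h _
    cases s with
    | nil => exact absurd rfl h
    | cons a t => simp
  · rename_i h _ _
    cases s with
    | nil => exact absurd rfl h
    | cons a t => simp

def solution (babbling : List String) : Int :=
  -- 'for babble in babbling: … if babble == "": cnt += 1'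
  babbling.foldl (fun cnt babble => if stripA babble.toList = [] then cnt + 1 else cnt) 0

-- ===== PORT B =====
-- words = ('aya', 'ye', 'woo', 'ma')
def pvWords : List (List Char) := [['a','y','a'], ['y','e'], ['w','o','o'], ['m','a']]

-- one 'dp.append(any(len(w) <= i and s[i-len(w):i] == w and dp[i-len(w)] for w in words))'
-- step of Source B at index i; under the guard len(w) ≤ i ≤ len(s) the slice s[i-len(w):i]
-- is nonnegative and in range → drop/take, and dp[i-len(w)] is in range → getD
-- (when the guard is false both Python's `and` and `&&` yield False, so the values agree).
def dpStep (s : List Char) (dp : List Bool) (i : Nat) : List Bool :=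
  dp ++ [pvWords.any (fun w =>
    decide (w.length ≤ i) && decide ((s.drop (i - w.length)).take w.length = w)
      && dp.getD (i - w.length) false)]

def solution_alt (babbling : List String) : Int :=
  babbling.foldl (fun total b =>
    -- 'dp = [True]; for i in range(1, len(s)+1): dp.append(…)'  (i = i0+1, i0 < len(s))
    let dp := (List.range b.toList.length).foldl (fun dp i0 => dpStep b.toList dp (i0 + 1)) [true]
    -- 'total += dp[-1]' — dp is nonempty, so dp[-1] is its last element; True adds 1
    if dp.getLastD false then total + 1 else total) 0

-- ===== PRECONDITION & SPEC =====
def Spec_solution (babbling : List String) (out : Int) : Prop := out = solution_alt babbling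
instance (babbling : List String) (out : Int) : Decidable (Spec_solution babbling out) := by unfold Spec_solution; infer_instance

-- ===== CLAIM (what is proved, stated in full; the proofs are below) =====
def Claim_equal_solution : Prop := ∀ (babbling : List String), Dom_solution babbling → Spec_solution babbling (solution babbling)

-- ===== LEMMAS AND PROOFS =====

-- s is a concatenation of tokens from pvWords
inductive IsStar : List Char → Prop
  | nil : IsStar []
  | cons (t r : List Char) : t ∈ pvWords → IsStar r → IsStar (t ++ r)

theorem star_append (r t : List Char) (hr : IsStar r) (ht : t ∈ pvWords) :
    IsStar (r ++ t) := by
  induction hr with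
  | nil => simpa using IsStar.cons t [] ht IsStar.nil
  | cons t' r' ht' _ ih => simpa [List.append_assoc] using IsStar.cons t' (r' ++ t) ht' ih

-- a nonempty star string ends with a token
theorem star_snoc (s : List Char) (hs : IsStar s) :
    s = [] ∨ ∃ r t, t ∈ pvWords ∧ IsStar r ∧ s = r ++ t := by
  induction hs with
  | nil => exact Or.inl rfl
  | cons t r ht _ ih =>
    rcases ih with h | ⟨r', t', ht', hr', rfl⟩
    · exact Or.inr ⟨[], t, ht, IsStar.nil, by simp [h]⟩
    · exact Or.inr ⟨t ++ r', t', ht', IsStar.cons t r' ht hr', by simp⟩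

-- a nonempty star string begins with a token
theorem star_head (s : List Char) (hs : IsStar s) (hne : s ≠ []) :
    ∃ t ∈ pvWords, s.take t.length = t ∧ IsStar (s.drop t.length) := by
  cases hs with
  | nil => exact absurd rfl hne
  | cons t r ht hr =>
    exact ⟨t, ht, by simp, by simpa using hr⟩

-- A's greedy loop empties the string exactly on star strings
theorem stripA_eq_nil_iff (s : List Char) : stripA s = [] ↔ IsStar s := by
  induction s using stripA.induct with
  | case1 => simp [stripA, IsStar.nil]
  | case2 s h h3 ih =>
    rw [stripA, if_neg h, if_pos h3, ih]
    constructor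
    · intro hst
      have hta := List.take_append_drop 3 s
      rcases h3 with h3 | h3 <;>
        · rw [← hta, h3]; exact IsStar.cons _ _ (by simp [pvWords]) hst
    · intro hst
      rcases star_head s hst h with ⟨t, ht, hpre, hdrop⟩
      have htk : s.take 2 = (s.take 3).take 2 := by simp [List.take_take]
      fin_cases ht
      · simpa using hdrop
      · exfalso; rcases h3 with h3 | h3 <;> simp_all
      · simpa using hdrop
      · exfalso; rcases h3 with h3 | h3 <;> simp_all
  | case3 s h h3 h2 ih =>
    rw [stripA, if_neg h, if_neg h3, if_pos h2, ih]
    constructor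
    · intro hst
      have hta := List.take_append_drop 2 s
      rcases h2 with h2' | h2' <;>
        · rw [← hta, h2']; exact IsStar.cons _ _ (by simp [pvWords]) hst
    · intro hst
      rcases star_head s hst h with ⟨t, ht, hpre, hdrop⟩
      fin_cases ht
      · exact absurd (Or.inl hpre) h3
      · simpa using hdrop
      · exact absurd (Or.inr hpre) h3
      · simpa using hdrop
  | case4 s h h3 h2 =>
    rw [stripA, if_neg h, if_neg h3, if_neg h2]
    constructor
    · intro hst; exact absurd hst h
    · intro hst
      exfalso
      rcases star_head s hst h with ⟨t, ht, hpre, _⟩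
      fin_cases ht
      · exact h3 (Or.inl hpre)
      · exact h2 (Or.inl hpre)
      · exact h3 (Or.inr hpre)
      · exact h2 (Or.inr hpre)

-- the one-token-back characterisation that the DP step computes
theorem star_take_succ (s : List Char) (i : Nat) (h1 : 1 ≤ i) (h2 : i ≤ s.length) :
    IsStar (s.take i) ↔
      ∃ w ∈ pvWords, w.length ≤ i ∧ (s.drop (i - w.length)).take w.length = w ∧
        IsStar (s.take (i - w.length)) := by
  constructor
  · intro hst
    have hlen : (s.take i).length = i := by simp; omega
    rcases star_snoc _ hst with hnil | ⟨r, t, ht, hr, heq⟩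
    · rw [hnil] at hlen; simp at hlen; omega
    · have hlts : r.length + t.length = i := by
        have := congrArg List.length heq; simpa [hlen] using this.symm
      have hlt : t.length ≤ i := by omega
      have hrlen : r.length = i - t.length := by omega
      refine ⟨t, ht, hlt, ?_, ?_⟩
      · have h1' : t = (s.take i).drop (i - t.length) := by
          rw [heq, ← hrlen, List.drop_left]
        rw [List.drop_take, show i - (i - t.length) = t.length by omega] at h1'
        exact h1'.symm
      · have h2' : r = (s.take i).take (i - t.length) := by
          rw [heq, ← hrlen, List.take_left]
        rw [List.take_take, show min (i - t.length) i = i - t.length by omega] at h2'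
        rw [← h2']; exact hr
  · rintro ⟨w, hw, hlt, hslice, hstar⟩
    have key : s.take i = s.take (i - w.length) ++ w := by
      conv_lhs => rw [← List.take_append_drop (i - w.length) (s.take i)]
      congr 1
      · rw [List.take_take]; congr 1; omega
      · rw [List.drop_take, show i - (i - w.length) = w.length by omega, hslice]
    rw [key]; exact star_append _ _ hstar hw

theorem pvWords_min_len (w : List Char) (hw : w ∈ pvWords) : 1 ≤ w.length := by
  fin_cases hw <;> simp

-- the fully-computed DP row
def dpSpec (s : List Char) (k : Nat) : List Bool :=
  (List.range (k + 1)).map (fun j => decide (stripA (s.take j) = []))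

theorem getD_map_range (f : Nat → Bool) (n j : Nat) (h : j < n) :
    ((List.range n).map f).getD j false = f j := by
  rw [List.getD_eq_getElem?_getD, List.getElem?_map, List.getElem?_range h]
  rfl

theorem step_spec (s : List Char) (k : Nat) (hk : k < s.length) :
    dpStep s (dpSpec s k) (k + 1) = dpSpec s (k + 1) := by
  have hgd : ∀ m, m ≤ k →
      (dpSpec s k).getD m false = decide (stripA (s.take m) = []) := fun m hm =>
    getD_map_range _ _ _ (by omega)
  have hany : pvWords.any (fun w =>
      decide (w.length ≤ k + 1) && decide ((s.drop (k + 1 - w.length)).take w.length = w)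
        && (dpSpec s k).getD (k + 1 - w.length) false)
      = decide (stripA (s.take (k + 1)) = []) := by
    rw [Bool.eq_iff_iff]
    simp only [List.any_eq_true, Bool.and_eq_true, decide_eq_true_eq, stripA_eq_nil_iff]
    rw [star_take_succ s (k + 1) (by omega) hk]
    constructor
    · rintro ⟨w, hw, ⟨hl, hs'⟩, hd⟩
      have hwlen : 1 ≤ w.length := pvWords_min_len w hw
      rw [hgd (k + 1 - w.length) (by omega)] at hd
      exact ⟨w, hw, hl, hs', (stripA_eq_nil_iff _).mp (of_decide_eq_true hd)⟩
    · rintro ⟨w, hw, hl, hs', hd⟩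
      have hwlen : 1 ≤ w.length := pvWords_min_len w hw
      refine ⟨w, hw, ⟨hl, hs'⟩, ?_⟩
      rw [hgd (k + 1 - w.length) (by omega)]
      exact decide_eq_true ((stripA_eq_nil_iff _).mpr hd)
  unfold dpStep
  rw [hany]
  unfold dpSpec
  rw [List.range_succ (n := k + 1), List.map_append]
  rfl

theorem dp_inv (s : List Char) (k : Nat) (hk : k ≤ s.length) :
    (List.range k).foldl (fun dp i0 => dpStep s dp (i0 + 1)) [true] = dpSpec s k := by
  induction k with
  | zero =>
    simp [dpSpec, List.range_succ]
    rw [stripA]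
    simp
  | succ k ih =>
    rw [List.range_succ, List.foldl_append, ih (by omega)]
    simpa using step_spec s k (by omega)

theorem dp_last (s : List Char) :
    ((List.range s.length).foldl (fun dp i0 => dpStep s dp (i0 + 1)) [true]).getLastD false
      = decide (stripA s = []) := by
  rw [dp_inv s s.length le_rfl]
  unfold dpSpec
  rw [List.range_succ, List.map_append]
  simp

theorem fold_eq (l : List String) (acc : Int) :
    l.foldl (fun cnt babble => if stripA babble.toList = [] then cnt + 1 else cnt) acc
      = l.foldl (fun total b =>
          let dp := (List.range b.toList.length).foldl
            (fun dp i0 => dpStep b.toList dp (i0 + 1)) [true]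
          if dp.getLastD false then total + 1 else total) acc := by
  induction l generalizing acc with
  | nil => rfl
  | cons b t ih =>
    simp only [List.foldl_cons]
    rw [dp_last b.toList]
    by_cases hb : stripA b.toList = []
    · simp [hb, ih]
    · simp [hb, ih]

-- ===== VERDICT (by name: the statement is the Claim_ definition above) =====
theorem solution_spec : Claim_equal_solution := by
  intro babbling _
  unfold Spec_solution solution solution_alt
  exact fold_eq babbling 0
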